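-- pv_equiv track=rewrite | github.com/pauubach/narrassist | api-server/routers/_partial_analysis.py | resolve_backend_phases
-- ===== SOURCE A (Python) =====
-- FRONTEND_TO_BACKEND: dict[str, list[str]] = {
--     # Tier 1 is atomic — requesting any Tier 1 phase triggers all three
--     "parsing":        ["parsing", "classification", "structure"],
--     "structure":      ["parsing", "classification", "structure"],
--     # Tier 2: heavy NLP phases
--     "entities":       ["ner"],
--     "coreference":    ["fusion"],
--     "attributes":     ["attributes"],
--     "coherence":      ["consistency"],
--     "grammar":        ["grammar"],
--     "spelling":       ["grammar"],          # same backend phase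
--     # Tier 3: enrichment (CPU-only, read from DB)
--     "relationships":  ["relationships"],
--     "voice_profiles": ["voice"],
--     "register":       ["prose"],
--     "pacing":         ["prose"],            # same backend phase
--     "temporal":       ["consistency"],      # sub-phase of consistency
--     "emotional":      ["health"],           # sub-phase of health
--     "sentiment":      ["health"],           # sub-phase of health
--     # No direct backend equivalent
--     "focalization":   [],
--     "interactions":   [],
-- }
--
-- BACKEND_PHASE_ORDER = [
--     "parsing", "classification", "structure",
--     "ner", "fusion", "attributes",
--     "consistency", "grammar", "alerts",
--     "relationships", "voice", "prose", "health",
-- ]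
--
-- BACKEND_PHASE_DEPS: dict[str, list[str]] = {
--     "parsing":        [],
--     "classification": ["parsing"],
--     "structure":      ["parsing"],
--     "ner":            ["parsing", "classification", "structure"],
--     "fusion":         ["ner"],
--     "attributes":     ["fusion"],
--     "consistency":    ["attributes"],
--     "grammar":        ["parsing", "structure"],
--     "alerts":         ["consistency", "grammar"],
--     "relationships":  ["fusion"],
--     "voice":          ["fusion"],
--     "prose":          ["structure"],
--     "health":         ["fusion", "structure"],
-- }
--
-- def resolve_backend_phases(
--     requested_frontend: list[str],
--     completed_phases: set[str],
--     force: bool,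
-- ) -> list[str]:
--     """
--     Resolve frontend phase names to an ordered list of backend phases to execute.
--
--     1. Map frontend names → backend names
--     2. Remove already-completed phases (unless force=True)
--     3. Expand with missing dependencies
--     4. Return in canonical execution order
--     """
--     # Step 1: map frontend → backend
--     needed: set[str] = set()
--     for fe_phase in requested_frontend:
--         for be_phase in FRONTEND_TO_BACKEND.get(fe_phase, []):
--             needed.add(be_phase)
--
--     if not needed:
--         return []
--
--     # Step 2: remove already completed (unless force)
--     if not force:
--         needed -= completed_phases
--
--     if not needed:
--         return []
--
--     # Step 3: expand dependencies recursively
--     expanded: set[str] = set()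
--
--     def _expand(phase: str):
--         if phase in expanded:
--             return
--         expanded.add(phase)
--         for dep in BACKEND_PHASE_DEPS.get(phase, []):
--             if dep not in completed_phases or force:
--                 _expand(dep)
--
--     for p in list(needed):
--         _expand(p)
--
--     # Step 4: return in canonical order
--     return [p for p in BACKEND_PHASE_ORDER if p in expanded]
-- ===== SOURCE B (Python) =====
-- FRONTEND_TO_BACKEND: dict[str, list[str]] = {
--     "parsing":        ["parsing", "classification", "structure"],
--     "structure":      ["parsing", "classification", "structure"],
--     "entities":       ["ner"],
--     "coreference":    ["fusion"],
--     "attributes":     ["attributes"],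
--     "coherence":      ["consistency"],
--     "grammar":        ["grammar"],
--     "spelling":       ["grammar"],
--     "relationships":  ["relationships"],
--     "voice_profiles": ["voice"],
--     "register":       ["prose"],
--     "pacing":         ["prose"],
--     "temporal":       ["consistency"],
--     "emotional":      ["health"],
--     "sentiment":      ["health"],
--     "focalization":   [],
--     "interactions":   [],
-- }
--
-- BACKEND_PHASE_ORDER = [
--     "parsing", "classification", "structure",
--     "ner", "fusion", "attributes",
--     "consistency", "grammar", "alerts",
--     "relationships", "voice", "prose", "health",
-- ]
--
-- BACKEND_PHASE_DEPS: dict[str, list[str]] = {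
--     "parsing":        [],
--     "classification": ["parsing"],
--     "structure":      ["parsing"],
--     "ner":            ["parsing", "classification", "structure"],
--     "fusion":         ["ner"],
--     "attributes":     ["fusion"],
--     "consistency":    ["attributes"],
--     "grammar":        ["parsing", "structure"],
--     "alerts":         ["consistency", "grammar"],
--     "relationships":  ["fusion"],
--     "voice":          ["fusion"],
--     "prose":          ["structure"],
--     "health":         ["fusion", "structure"],
-- }
--
--
-- def resolve_backend_phases(
--     requested_frontend: list[str],
--     completed_phases: set[str],
--     force: bool,
-- ) -> list[str]:
--     """Iterative worklist version: map frontend -> backend, seed a stack with the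
--     not-yet-completed (or forced) backend phases, expand dependencies with an
--     explicit stack instead of recursion, and return the canonical-order filter."""
--     mapped = {be for fe in requested_frontend for be in FRONTEND_TO_BACKEND.get(fe, [])}
--     stack = [be for be in mapped if force or be not in completed_phases]
--     expanded: set[str] = set()
--     while stack:
--         phase = stack.pop()
--         if phase in expanded:
--             continue
--         expanded.add(phase)
--         stack.extend(dep for dep in BACKEND_PHASE_DEPS.get(phase, [])
--                      if dep not in completed_phases or force)
--     return [p for p in BACKEND_PHASE_ORDER if p in expanded]
-- ===== Notes on version B (the rewrite author's own statement) =====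
-- stated objective: alternative
-- what changed: The recursive _expand closure (shared mutable visited set, per-dep recursion) is replaced by an explicit stack/worklist DFS seeded directly with the still-needed phases, dropping the inner helper, the set subtraction and both early returns.
import Mathlib
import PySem

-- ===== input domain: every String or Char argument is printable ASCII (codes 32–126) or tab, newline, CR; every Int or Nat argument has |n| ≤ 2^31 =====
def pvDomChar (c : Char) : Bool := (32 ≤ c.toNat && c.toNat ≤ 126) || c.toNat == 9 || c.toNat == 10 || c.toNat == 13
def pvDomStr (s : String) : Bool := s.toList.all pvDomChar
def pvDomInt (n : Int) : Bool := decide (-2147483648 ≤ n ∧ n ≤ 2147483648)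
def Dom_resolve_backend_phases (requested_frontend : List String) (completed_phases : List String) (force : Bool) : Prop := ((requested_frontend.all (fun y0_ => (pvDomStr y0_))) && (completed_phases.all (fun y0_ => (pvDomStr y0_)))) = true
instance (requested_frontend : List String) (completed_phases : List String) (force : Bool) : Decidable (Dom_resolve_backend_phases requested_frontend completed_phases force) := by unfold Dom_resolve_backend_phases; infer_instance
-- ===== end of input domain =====

-- B replaces A's recursive `_expand` closure by an explicit stack/worklist DFS seeded with the
-- still-needed phases (objective: alternative, same cost). Python iterates sets in unspecified hash
-- order; both ports fix insertion order — the returned canonical-order filter does not depend on it.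

-- ===== PORT A =====

-- module constants (shared by both Pythons)
def pvF2B : PySem.Dict String (List String) := PySem.Dict.ofList [
  ("parsing", ["parsing", "classification", "structure"]),
  ("structure", ["parsing", "classification", "structure"]),
  ("entities", ["ner"]),
  ("coreference", ["fusion"]),
  ("attributes", ["attributes"]),
  ("coherence", ["consistency"]),
  ("grammar", ["grammar"]),
  ("spelling", ["grammar"]),
  ("relationships", ["relationships"]),
  ("voice_profiles", ["voice"]),
  ("register", ["prose"]),
  ("pacing", ["prose"]),
  ("temporal", ["consistency"]),
  ("emotional", ["health"]),
  ("sentiment", ["health"]),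
  ("focalization", []),
  ("interactions", [])]

def pvORDER : List String :=
  ["parsing", "classification", "structure",
   "ner", "fusion", "attributes",
   "consistency", "grammar", "alerts",
   "relationships", "voice", "prose", "health"]

def pvDEPS : PySem.Dict String (List String) := PySem.Dict.ofList [
  ("parsing", []),
  ("classification", ["parsing"]),
  ("structure", ["parsing"]),
  ("ner", ["parsing", "classification", "structure"]),
  ("fusion", ["ner"]),
  ("attributes", ["fusion"]),
  ("consistency", ["attributes"]),
  ("grammar", ["parsing", "structure"]),
  ("alerts", ["consistency", "grammar"]),
  ("relationships", ["fusion"]),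
  ("voice", ["fusion"]),
  ("prose", ["structure"]),
  ("health", ["fusion", "structure"])]

-- A's recursive `_expand`; the constant fuel 32 only makes the recursion structural: the recursion
-- adds a fresh phase of the 13-element graph at each level, so Python's depth never exceeds 14.
def pvExpandA (completed : List String) (force : Bool) : Nat → PySem.Set String → String → PySem.Set String
  | 0, exp, _ => exp
  | fuel + 1, exp, phase =>
      if PySem.Set.contains exp phase then exp
      else (pvDEPS.getD phase []).foldl
        (fun e dep => if !(completed.contains dep) || force then pvExpandA completed force fuel e dep else e)
        (PySem.Set.add exp phase)

def resolve_backend_phases (requested_frontend : List String) (completed_phases : List String) (force : Bool) : List String :=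
  let needed : PySem.Set String :=
    requested_frontend.foldl (fun s fe => (pvF2B.getD fe []).foldl PySem.Set.add s) PySem.Set.empty
  if needed.isEmpty then []
  else
    let needed2 := if !force then PySem.Set.diff needed completed_phases else needed
    if needed2.isEmpty then []
    else
      let expanded := needed2.foldl (fun e p => pvExpandA completed_phases force 32 e p) PySem.Set.empty
      pvORDER.filter (fun p => PySem.Set.contains expanded p)

-- ===== PORT B =====

-- termination measure for the worklist loop: phases of the graph not yet visited
def pvU (exp : List String) : Nat := (pvORDER.filter (fun x => !(exp.contains x))).length

theorem pv_filter_len_mono {α : Type} (p q : α → Bool) :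
    ∀ (l : List α), (∀ a ∈ l, p a = true → q a = true) →
      (l.filter p).length ≤ (l.filter q).length := by
  intro l
  induction l with
  | nil => intro _; simp
  | cons b bs ih =>
    intro h
    have hbs := ih (fun a ha => h a (List.mem_cons_of_mem _ ha))
    by_cases hp : p b = true
    · have hq := h b (List.mem_cons_self) hp
      simp [hp, hq]; omega
    · by_cases hq : q b = true <;>
        simp [hp, hq] <;> omega

theorem pv_filter_len_strict {α : Type} (p q : α → Bool) (a : α) :
    ∀ (l : List α), a ∈ l → q a = true → p a = false →
      (∀ x ∈ l, p x = true → q x = true) →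
      (l.filter p).length < (l.filter q).length := by
  intro l
  induction l with
  | nil => intro h; cases h
  | cons b bs ih =>
    intro hmem hqa hpa h
    rcases List.mem_cons.mp hmem with rfl | hbs
    · have := pv_filter_len_mono p q bs (fun x hx => h x (List.mem_cons_of_mem _ hx))
      simp [hpa, hqa]; omega
    · have hih := ih hbs hqa hpa (fun x hx => h x (List.mem_cons_of_mem _ hx))
      by_cases hp : p b = true
      · have hq := h b List.mem_cons_self hp
        simp [hp, hq]; omega
      · by_cases hq : q b = true <;>
          simp [hp, hq] <;> omega

theorem pvU_add_lt (exp : List String) (phase : String)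
    (hmem : phase ∈ pvORDER) (h : PySem.Set.contains exp phase = false) :
    pvU (PySem.Set.add exp phase) < pvU exp := by
  have h' : phase ∉ exp := by
    simpa [PySem.Set.contains, List.contains_eq_mem] using h
  have hadd : PySem.Set.add exp phase = exp ++ [phase] := by
    simp [PySem.Set.add, h']
  rw [pvU, pvU, hadd]
  apply pv_filter_len_strict _ _ phase _ hmem
  · simpa [PySem.Set.contains, List.contains_eq_mem] using h
  · simp [List.contains_eq_mem]
  · intro x _ hx
    simp only [List.contains_eq_mem, List.mem_append, Bool.not_eq_true', decide_eq_false_iff_not] at hx ⊢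
    intro hc; exact hx (Or.inl hc)

theorem pvU_add_eq (exp : List String) (phase : String) (hmem : phase ∉ pvORDER) :
    pvU (PySem.Set.add exp phase) = pvU exp := by
  by_cases h : phase ∈ exp
  · simp [PySem.Set.add, h]
  · have hadd : PySem.Set.add exp phase = exp ++ [phase] := by
      simp [PySem.Set.add, h]
    rw [pvU, pvU, hadd]
    congr 1
    apply List.filter_congr
    intro x hx
    have hne : x ≠ phase := fun hcontra => hmem (hcontra ▸ hx)
    simp [List.contains_eq_mem, hne]

theorem pvDepsNil (phase : String) (hmem : phase ∉ pvORDER) : pvDEPS.getD phase [] = [] := by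
  simp only [pvORDER, List.mem_cons, List.not_mem_nil, or_false, not_or] at hmem
  obtain ⟨h1, h2, h3, h4, h5, h6, h7, h8, h9, h10, h11, h12, h13⟩ := hmem
  have e1 : ("parsing" == phase) = false := by simpa using Ne.symm h1
  have e2 : ("classification" == phase) = false := by simpa using Ne.symm h2
  have e3 : ("structure" == phase) = false := by simpa using Ne.symm h3
  have e4 : ("ner" == phase) = false := by simpa using Ne.symm h4
  have e5 : ("fusion" == phase) = false := by simpa using Ne.symm h5
  have e6 : ("attributes" == phase) = false := by simpa using Ne.symm h6
  have e7 : ("consistency" == phase) = false := by simpa using Ne.symm h7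
  have e8 : ("grammar" == phase) = false := by simpa using Ne.symm h8
  have e9 : ("alerts" == phase) = false := by simpa using Ne.symm h9
  have e10 : ("relationships" == phase) = false := by simpa using Ne.symm h10
  have e11 : ("voice" == phase) = false := by simpa using Ne.symm h11
  have e12 : ("prose" == phase) = false := by simpa using Ne.symm h12
  have e13 : ("health" == phase) = false := by simpa using Ne.symm h13
  simp [pvDEPS, PySem.Dict.getD, PySem.Dict.ofList, PySem.Dict.get?, PySem.Dict.update,
    PySem.Dict.insert, PySem.Dict.contains, PySem.Dict.empty, List.find?,
    e1, e2, e3, e4, e5, e6, e7, e8, e9, e10, e11, e12, e13]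

-- B's worklist loop: pop a phase, skip if visited, otherwise visit it and push its
-- not-completed (or forced) dependencies.
def pvLoopB (completed : List String) (force : Bool) : List String → PySem.Set String → PySem.Set String
  | [], exp => exp
  | phase :: rest, exp =>
      if h : PySem.Set.contains exp phase then pvLoopB completed force rest exp
      else pvLoopB completed force
        (((pvDEPS.getD phase []).filter (fun dep => !(completed.contains dep) || force)) ++ rest)
        (PySem.Set.add exp phase)
termination_by stack exp => (pvU exp, stack.length)
decreasing_by
  · apply Prod.Lex.right; simp
  · by_cases hmem : phase ∈ pvORDER
    · exact Prod.Lex.left _ _ (pvU_add_lt exp phase hmem (by simpa using h))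
    · rw [pvU_add_eq exp phase hmem, pvDepsNil phase hmem]
      apply Prod.Lex.right; simp

def resolve_backend_phases_alt (requested_frontend : List String) (completed_phases : List String) (force : Bool) : List String :=
  let mapped : PySem.Set String :=
    requested_frontend.foldl (fun s fe => (pvF2B.getD fe []).foldl PySem.Set.add s) PySem.Set.empty
  let stack := mapped.filter (fun be => force || !(completed_phases.contains be))
  let expanded := pvLoopB completed_phases force stack PySem.Set.empty
  pvORDER.filter (fun p => PySem.Set.contains expanded p)

-- ===== PRECONDITION & SPEC =====
def Spec_resolve_backend_phases (requested_frontend : List String) (completed_phases : List String) (force : Bool) (out : List String) : Prop := out = resolve_backend_phases_alt requested_frontend completed_phases force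
instance (requested_frontend : List String) (completed_phases : List String) (force : Bool) (out : List String) : Decidable (Spec_resolve_backend_phases requested_frontend completed_phases force out) := by unfold Spec_resolve_backend_phases; infer_instance

-- ===== CLAIM (what is proved, stated in full; the proofs are below) =====
def Claim_equal_resolve_backend_phases : Prop := ∀ (requested_frontend : List String) (completed_phases : List String) (force : Bool), Dom_resolve_backend_phases requested_frontend completed_phases force → Spec_resolve_backend_phases requested_frontend completed_phases force (resolve_backend_phases requested_frontend completed_phases force)

-- ===== LEMMAS AND PROOFS =====

theorem pvU_anti (e e' : List String) (h : ∀ x ∈ e, x ∈ e') : pvU e' ≤ pvU e := by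
  apply pv_filter_len_mono
  intro a _ ha
  simp only [Bool.not_eq_true', List.contains_eq_mem, decide_eq_false_iff_not] at ha ⊢
  exact fun hc => ha (h a hc)

theorem pv_not_contains (e : List String) (p : String) (h : p ∉ e) :
    ¬ (PySem.Set.contains e p = true) := by
  simpa [PySem.Set.contains, List.contains_eq_mem] using h

theorem pvExpandA_mono (c : List String) (f : Bool) :
    ∀ (fuel : Nat) (exp : List String) (p x : String), x ∈ exp → x ∈ pvExpandA c f fuel exp p := by
  intro fuel
  induction fuel with
  | zero => intro exp p x hx; simpa [pvExpandA] using hx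
  | succ n ih =>
    have hfold : ∀ (ds acc : List String) (x : String), x ∈ acc →
        x ∈ ds.foldl (fun e dep => if !(c.contains dep) || f then pvExpandA c f n e dep else e) acc := by
      intro ds
      induction ds with
      | nil => intro acc x hx; simpa using hx
      | cons d ds ihd =>
        intro acc x hx
        simp only [List.foldl_cons]
        apply ihd
        split
        · exact ih _ _ _ hx
        · exact hx
    intro exp p x hx
    simp only [pvExpandA]
    split
    · exact hx
    · refine hfold _ _ _ ?_
      simp only [PySem.Set.add]
      split
      · exact hx
      · exact List.mem_append_left _ hx

theorem pvExpandA_fuel_succ (c : List String) (f : Bool) :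
    ∀ (n : Nat) (exp : List String) (p : String), pvU exp < n →
      pvExpandA c f n exp p = pvExpandA c f (n + 1) exp p := by
  intro n
  induction n using Nat.strong_induction_on with
  | _ n ih =>
    intro exp p h
    obtain ⟨m, rfl⟩ : ∃ m, n = m + 1 := ⟨n - 1, by omega⟩
    by_cases hp : p ∈ exp
    · have hc : PySem.Set.contains exp p = true := by
        simpa [PySem.Set.contains, List.contains_eq_mem] using hp
      simp only [pvExpandA, if_pos hc]
    · have hc : ¬ (PySem.Set.contains exp p = true) := pv_not_contains exp p hp
      simp only [pvExpandA, if_neg hc]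
      by_cases hmem : p ∈ pvORDER
      · have hc' : PySem.Set.contains exp p = false := by simpa using hc
        have hlt : pvU (PySem.Set.add exp p) < m := by
          have := pvU_add_lt exp p hmem hc'; omega
        have hfold : ∀ (ds acc : List String), pvU acc < m →
            ds.foldl (fun e dep => if !(c.contains dep) || f then pvExpandA c f m e dep else e) acc
              = ds.foldl (fun e dep => if !(c.contains dep) || f then pvExpandA c f (m + 1) e dep else e) acc := by
          intro ds
          induction ds with
          | nil => intro acc _; rfl
          | cons d ds ihd =>
            intro acc hacc
            simp only [List.foldl_cons]
            by_cases hg : (!(c.contains d) || f) = true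
            · rw [if_pos hg, if_pos hg, ← ih m (by omega) acc d hacc]
              apply ihd
              have hanti : pvU (pvExpandA c f m acc d) ≤ pvU acc :=
                pvU_anti _ _ (fun x hx => pvExpandA_mono c f m acc d x hx)
              omega
            · rw [if_neg hg, if_neg hg]
              exact ihd acc hacc
        exact hfold _ _ hlt
      · rw [pvDepsNil p hmem]
        simp only [List.foldl_nil]

theorem pvExpandA_fuel_ge (c : List String) (f : Bool) :
    ∀ (g n : Nat), n ≤ g → ∀ (exp : List String) (p : String), pvU exp < n →
      pvExpandA c f n exp p = pvExpandA c f g exp p := by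
  intro g
  induction g with
  | zero => intro n hn exp p h; omega
  | succ g ihg =>
    intro n hn exp p h
    rcases Nat.lt_or_ge n (g + 1) with hlt | hge
    · rw [ihg n (by omega) exp p h]
      exact pvExpandA_fuel_succ c f g exp p (by omega)
    · have : n = g + 1 := by omega
      subst this; rfl

theorem pvU_le13 (exp : List String) : pvU exp ≤ 13 := by
  have := List.length_filter_le (fun x => !(exp.contains x)) pvORDER
  simpa [pvU, pvORDER] using this

theorem pv_foldl_guard (c : List String) (f : Bool) (n : Nat) :
    ∀ (ds acc : List String),
      ds.foldl (fun e dep => if !(c.contains dep) || f then pvExpandA c f n e dep else e) acc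
        = (ds.filter (fun dep => !(c.contains dep) || f)).foldl (fun e p => pvExpandA c f n e p) acc := by
  intro ds
  induction ds with
  | nil => intro acc; rfl
  | cons d ds ihd =>
    intro acc
    simp only [List.foldl_cons, List.filter_cons]
    by_cases hg : (!(c.contains d) || f) = true
    · rw [if_pos hg, if_pos hg, List.foldl_cons]
      exact ihd _
    · rw [if_neg hg, if_neg hg]
      exact ihd _

theorem pv_fold_fuel (c : List String) (f : Bool) :
    ∀ (l acc : List String),
      l.foldl (fun e p => pvExpandA c f 31 e p) acc = l.foldl (fun e p => pvExpandA c f 32 e p) acc := by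
  intro l
  induction l with
  | nil => intro acc; simp only [List.foldl_nil]
  | cons d l ihd =>
    intro acc
    simp only [List.foldl_cons]
    rw [pvExpandA_fuel_ge c f 32 31 (by omega) acc d (by have := pvU_le13 acc; omega)]
    exact ihd _

theorem pvLoopB_eq_fold (c : List String) (f : Bool) :
    ∀ (stack : List String) (exp : PySem.Set String),
      pvLoopB c f stack exp = stack.foldl (fun e p => pvExpandA c f 32 e p) exp := by
  intro stack exp
  induction stack, exp using pvLoopB.induct c f with
  | case1 exp => simp [pvLoopB]
  | case2 phase rest exp h ih =>
    rw [pvLoopB, dif_pos h]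
    have h32 : pvExpandA c f 32 exp phase = exp := by
      show pvExpandA c f (31 + 1) exp phase = exp
      simp only [pvExpandA, if_pos h]
    simp only [List.foldl_cons, h32]
    exact ih
  | case3 phase rest exp h ih =>
    rw [pvLoopB, dif_neg h]
    rw [ih, List.foldl_append]
    simp only [List.foldl_cons]
    congr 1
    have hx : pvExpandA c f 32 exp phase
        = ((pvDEPS.getD phase []).filter (fun dep => !(c.contains dep) || f)).foldl
            (fun e p => pvExpandA c f 31 e p) (PySem.Set.add exp phase) := by
      show pvExpandA c f (31 + 1) exp phase = _
      rw [pvExpandA, if_neg h]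
      exact pv_foldl_guard c f 31 _ _
    rw [hx, pv_fold_fuel]

-- ===== VERDICT (by name: the statement is the Claim_ definition above) =====
theorem resolve_backend_phases_spec : Claim_equal_resolve_backend_phases := by
  unfold Claim_equal_resolve_backend_phases
  intro rf cf force _
  unfold Spec_resolve_backend_phases resolve_backend_phases resolve_backend_phases_alt
  dsimp only
  rw [pvLoopB_eq_fold]
  cases force with
  | true =>
    simp only [Bool.not_true, Bool.true_or, List.filter_true, Bool.false_eq_true, if_false]
    by_cases hM : (rf.foldl (fun s fe => (pvF2B.getD fe []).foldl PySem.Set.add s) PySem.Set.empty).isEmpty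
    · rw [List.isEmpty_iff] at hM
      rw [hM]
      simp
    · simp only [hM, Bool.false_eq_true, if_false]
  | false =>
    simp only [Bool.not_false, Bool.false_or, if_true]
    have hdiff : PySem.Set.diff (rf.foldl (fun s fe => (pvF2B.getD fe []).foldl PySem.Set.add s) PySem.Set.empty) cf
        = (rf.foldl (fun s fe => (pvF2B.getD fe []).foldl PySem.Set.add s) PySem.Set.empty).filter
            (fun be => !(cf.contains be)) := rfl
    rw [hdiff]
    by_cases hM : (rf.foldl (fun s fe => (pvF2B.getD fe []).foldl PySem.Set.add s) PySem.Set.empty).isEmpty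
    · rw [List.isEmpty_iff] at hM
      rw [hM]
      simp
    · simp only [hM, Bool.false_eq_true, if_false]
      by_cases hN : ((rf.foldl (fun s fe => (pvF2B.getD fe []).foldl PySem.Set.add s) PySem.Set.empty).filter
          (fun be => !(cf.contains be))).isEmpty
      · rw [List.isEmpty_iff] at hN
        rw [hN]
        simp
      · simp only [hN, Bool.false_eq_true, if_false]
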